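-- pv_equiv track=rewrite | github.com/biegel1/competitive_programming | hackerrank/Largest Permutation.py | largestPermutation
-- ===== SOURCE A (Python) =====
-- def largestPermutation(k,arr):
--     sorted_arr = sorted(arr[:], reverse = True)
--     b_arr = arr[:]
--     indices = {}
--     for i in range(len(arr)):
--         indices[arr[i]] = i
--     i = 0
--     while k>0 and i < len(arr):
--
--         n_elem = sorted_arr[i]
--         o_elem = arr[i]
--         if n_elem == o_elem:
--             i+=1
--         else:
--             idx = indices[n_elem]
--             arr[i] = n_elem
--             indices[n_elem] = i
--             arr[idx] = o_elem
--             indices[o_elem] = idx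
--             i+=1
--             k-=1
--     return arr
-- ===== SOURCE B (Python) =====
-- def largestPermutation(k, arr):
--     # Simpler greedy: no sort, no index dict -- at each position pull up the
--     # max of the remaining suffix.  Mutates arr in place, like the original.
--     for i in range(len(arr)):
--         if k <= 0:
--             break
--         suffix = arr[i:]
--         m = max(suffix)
--         j = i + suffix.index(m)
--         if j != i:
--             arr[i], arr[j] = arr[j], arr[i]
--             k -= 1
--     return arr
-- ===== Notes on version B (the rewrite author's own statement) =====
-- stated objective: simpler
-- what changed: Replaces the pre-sort plus value->index dict bookkeeping with a direct greedy selection scan: at each position take the max of the remaining suffix and swap it up, so the sort and the dict disappear.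
-- outside the precondition, e.g. on largestPermutation(3, [2, 1, 3, 2]): A returns [3, 1, 2, 2], B returns [3, 2, 2, 1]
import Mathlib
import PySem

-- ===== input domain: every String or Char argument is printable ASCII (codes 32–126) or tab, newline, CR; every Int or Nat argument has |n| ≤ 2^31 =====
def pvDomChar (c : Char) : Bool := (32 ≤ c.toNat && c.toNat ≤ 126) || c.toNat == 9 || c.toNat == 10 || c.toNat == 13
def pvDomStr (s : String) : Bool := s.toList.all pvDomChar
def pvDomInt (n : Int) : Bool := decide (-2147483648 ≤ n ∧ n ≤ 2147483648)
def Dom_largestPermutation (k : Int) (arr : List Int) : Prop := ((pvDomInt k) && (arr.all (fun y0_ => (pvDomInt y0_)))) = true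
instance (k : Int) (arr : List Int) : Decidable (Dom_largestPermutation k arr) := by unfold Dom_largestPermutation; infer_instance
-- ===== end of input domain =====

-- B replaces A's pre-sort + value->index dict with a direct greedy selection scan (max of the
-- remaining suffix swapped up); same return value on duplicate-free lists.  Note: the Python A
-- mutates `arr` in place and so does the Python B; the equivalence proved here is about the
-- return value.

-- ===== PORT A =====
-- `for i in range(len(arr)): indices[arr[i]] = i`
def lpIndicesA (arr : List Int) : PySem.Dict Int Int :=
  (PySem.List.pyRange 0 arr.length 1).foldl
    (fun d i => d.insert (PySem.List.pyGetD arr i 0) i) PySem.Dict.empty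

-- `while k>0 and i < len(arr): ...`.  Python's loop counter i starts at 0 and only increments,
-- so it is kept as a Nat; under the loop guard i < len(arr) = len(sorted_arr), so the subscripts
-- sorted_arr[i] / arr[i] are in range and `getD _ 0` is exact, and indices[n_elem] is a present
-- key (every element of arr is a key), so `Dict.getD _ 0` is exact; idx ≥ 0 always, so `.toNat`
-- is exact.
def lpLoopA (sorted_arr arr : List Int) (indices : PySem.Dict Int Int) (k : Int) (i : Nat) :
    List Int :=
  if h : 0 < k ∧ i < arr.length then
    let n_elem := sorted_arr.getD i 0
    let o_elem := arr.getD i 0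
    if n_elem = o_elem then
      lpLoopA sorted_arr arr indices k (i + 1)
    else
      let idx := (indices.getD n_elem 0).toNat
      lpLoopA sorted_arr ((arr.set i n_elem).set idx o_elem)
        ((indices.insert n_elem (i : Int)).insert o_elem (idx : Int)) (k - 1) (i + 1)
  else arr
termination_by arr.length - i
decreasing_by
  · omega
  · simp only [List.length_set]; omega

def largestPermutation (k : Int) (arr : List Int) : List Int :=
  lpLoopA (PySem.List.sorted arr (fun x => x) true) arr (lpIndicesA arr) k 0

-- ===== PORT B =====
-- `for i in range(len(arr)): if k <= 0: break; ...`.  Under the loop guard `arr[i:]` is the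
-- nonempty `arr.drop i`, so max() returns (getD 0 exact) and m ∈ suffix, so index() returns
-- (getD 0 exact); j < len(arr), so the swap subscripts are in range (`getD _ 0` exact).
def lpLoopB (k : Int) (arr : List Int) (i : Nat) : List Int :=
  if h : i < arr.length then
    if k ≤ 0 then arr
    else
      let suffix := arr.drop i
      let m := (PySem.List.max? suffix (fun x => x)).getD 0
      let j := i + (PySem.List.index? suffix m).getD 0
      if j ≠ i then
        lpLoopB (k - 1) ((arr.set i (arr.getD j 0)).set j (arr.getD i 0)) (i + 1)
      else lpLoopB k arr (i + 1)
  else arr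
termination_by arr.length - i
decreasing_by
  · simp only [List.length_set]; omega
  · omega

def largestPermutation_alt (k : Int) (arr : List Int) : List Int := lpLoopB k arr 0

-- ===== PRECONDITION & SPEC =====
-- When swaps can happen (k > 0), Pre_ excludes lists with duplicate values: there which
-- occurrence of a duplicated value gets swapped is unspecified by the task, and A's dict
-- (keyed by value, overwritten on every swap) makes that choice an accident of its
-- bookkeeping, while B swaps the first occurrence; with k ≤ 0 no swap happens at all.
def Pre_largestPermutation (k : Int) (arr : List Int) : Prop := k ≤ 0 ∨ arr.Nodup
instance (k : Int) (arr : List Int) : Decidable (Pre_largestPermutation k arr) := by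
  unfold Pre_largestPermutation; infer_instance

def pvWitness_largestPermutation : Int × List Int := (2, [3, 1, 4, 2])

def Spec_largestPermutation (k : Int) (arr : List Int) (out : List Int) : Prop :=
  out = largestPermutation_alt k arr
instance (k : Int) (arr : List Int) (out : List Int) :
    Decidable (Spec_largestPermutation k arr out) := by
  unfold Spec_largestPermutation; infer_instance

-- ===== CLAIM (what is proved, stated in full; the proofs are below) =====
def Claim_equal_largestPermutation : Prop :=
  ∀ (k : Int) (arr : List Int), Dom_largestPermutation k arr →
    Pre_largestPermutation k arr →
    Spec_largestPermutation k arr (largestPermutation k arr)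

-- ===== LEMMAS AND PROOFS =====

-- the joint loop invariant at position i
def LPInv (sorted_arr arr : List Int) (indices : PySem.Dict Int Int) (i : Nat) : Prop :=
  arr.Nodup ∧ sorted_arr.Perm arr ∧ sorted_arr.Pairwise (fun a b => b < a) ∧
  (∀ j, j < i → arr.getD j 0 = sorted_arr.getD j 0) ∧
  (∀ v ∈ arr, indices.get? v = some (arr.idxOf v : Int))

theorem idxOf?_of_mem {xs : List Int} {v : Int} (h : v ∈ xs) :
    xs.idxOf? v = some (xs.idxOf v) := by
  induction xs with
  | nil => cases h
  | cons x t ih =>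
    by_cases hx : x = v
    · subst hx; simp [List.idxOf?_cons]
    · have hm : v ∈ t := by cases h with
        | head => exact absurd rfl hx
        | tail _ h => exact h
      simp [List.idxOf?_cons, hx, ih hm,
        show (x == v) = false by simpa using hx]

theorem getElem_notMem_take (arr : List Int) (j : Nat) (hn : arr.Nodup) (hj : j < arr.length) :
    arr[j] ∉ arr.take j := by
  have h := hn
  rw [← List.take_append_drop j arr, List.nodup_append] at h
  have hmem : arr[j] ∈ arr.drop j := by
    rw [List.drop_eq_getElem_cons hj]; exact List.mem_cons_self
  intro hc
  exact h.2.2 _ hc _ hmem rfl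

theorem lpIndicesA_aux (arr : List Int) (hn : arr.Nodup) :
    ∀ (j : Nat), j ≤ arr.length → ∀ v ∈ arr.take j,
      ((PySem.List.pyRange 0 (j : Int) 1).foldl
        (fun d i => d.insert (PySem.List.pyGetD arr i 0) i) PySem.Dict.empty).get? v
        = some (arr.idxOf v : Int) := by
  intro j
  induction j with
  | zero => intro _ v hv; simp at hv
  | succ j ih =>
    intro hle v hv
    have hj : j < arr.length := by omega
    have hr : PySem.List.pyRange 0 ((j : Nat) + 1 : Int) 1
        = PySem.List.pyRange 0 (j : Int) 1 ++ [(j : Int)] :=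
      PySem.List.pyRange_one_succ_right (by omega)
    have hcast : (((j + 1 : Nat)) : Int) = ((j : Nat) : Int) + 1 := by push_cast; ring
    rw [hcast, hr, List.foldl_append]
    simp only [List.foldl_cons, List.foldl_nil]
    have hget : PySem.List.pyGetD arr (j : Int) 0 = arr[j] := by
      rw [PySem.List.pyGetD_natCast]; exact List.getD_eq_getElem arr 0 hj
    rw [hget]
    rcases List.mem_append.mp (by
        have := hv
        rwa [List.take_add_one, List.getElem?_eq_getElem hj] at this) with hv' | hv'
    · have hne : v ≠ arr[j] := by
        intro hvv; rw [hvv] at hv'; exact getElem_notMem_take arr j hn hj hv'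
      rw [PySem.Dict.get?_insert_of_ne _ _ hne]
      exact ih (by omega) v hv'
    · have hvv : v = arr[j] := by simpa using hv'
      subst hvv
      rw [PySem.Dict.get?_insert_self]
      rw [hn.idxOf_getElem j hj]

theorem lpIndicesA_get (arr : List Int) (hn : arr.Nodup) (v : Int) (hv : v ∈ arr) :
    (lpIndicesA arr).get? v = some (arr.idxOf v : Int) := by
  have := lpIndicesA_aux arr hn arr.length le_rfl v (by rwa [List.take_length])
  exact this

theorem getElem_set_set (l : List Int) (i j p : Nat) (a b : Int) (hp : p < l.length) :
    ((l.set i a).set j b)[p]'(by simpa using hp)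
      = if p = j then b else if p = i then a else l[p]'hp := by
  by_cases h1 : p = j
  · subst h1
    rw [if_pos rfl]
    exact List.getElem_set_self (by simpa using hp)
  · rw [if_neg h1, List.getElem_set_ne (fun h => h1 h.symm) (by simpa using hp)]
    by_cases h2 : p = i
    · subst h2
      rw [if_pos rfl]
      exact List.getElem_set_self (by simpa using hp)
    · rw [if_neg h2]
      exact List.getElem_set_ne (fun h => h2 h.symm) (by simpa using hp)

theorem lp_main (d : Nat) : ∀ (k : Int) (sorted_arr arr : List Int)
    (indices : PySem.Dict Int Int) (i : Nat),
    arr.length - i ≤ d → LPInv sorted_arr arr indices i →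
    lpLoopA sorted_arr arr indices k i = lpLoopB k arr i := by
  induction d with
  | zero =>
    intro k sorted_arr arr indices i hd _
    rw [lpLoopA, lpLoopB,
      dif_neg (by omega : ¬ (0 < k ∧ i < arr.length)),
      dif_neg (by omega : ¬ i < arr.length)]
  | succ d ih =>
    intro k sorted_arr arr indices i hd hinv
    by_cases hi : i < arr.length
    · by_cases hk : 0 < k
      · -- both loops take a step
        obtain ⟨hnd, hperm, hpair, hpre, hind⟩ := hinv
        have hslen : sorted_arr.length = arr.length := hperm.length_eq
        have his : i < sorted_arr.length := by omega
        have hgs : sorted_arr.getD i 0 = sorted_arr[i] := List.getD_eq_getElem _ 0 his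
        have hga : arr.getD i 0 = arr[i] := List.getD_eq_getElem _ 0 hi
        -- the prefix below i agrees with sorted_arr
        have htake : arr.take i = sorted_arr.take i := by
          apply List.ext_getElem
          · simp [hslen]
          · intro p h1 h2
            have hp : p < i := by simp [List.length_take] at h1; omega
            have e := hpre p hp
            rw [List.getD_eq_getElem _ 0 (by omega : p < arr.length),
              List.getD_eq_getElem _ 0 (by omega : p < sorted_arr.length)] at e
            rw [List.getElem_take, List.getElem_take]
            exact e
        -- the suffixes are permutations of each other
        have hdropperm : (sorted_arr.drop i).Perm (arr.drop i) := by
          have h := hperm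
          rw [← List.take_append_drop i sorted_arr, ← List.take_append_drop i arr,
            ← htake] at h
          exact (List.perm_append_left_iff _).mp h
        have hdrops : sorted_arr.drop i = sorted_arr[i] :: sorted_arr.drop (i + 1) :=
          List.drop_eq_getElem_cons his
        have hdropa : arr.drop i = arr[i] :: arr.drop (i + 1) :=
          List.drop_eq_getElem_cons hi
        -- sorted_arr[i] bounds the suffix of arr from above
        have hub : ∀ y ∈ arr.drop i, y ≤ sorted_arr[i] := by
          intro y hy
          have hy' : y ∈ sorted_arr.drop i := hdropperm.mem_iff.mpr hy
          rw [hdrops] at hy'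
          rcases List.mem_cons.mp hy' with h | h
          · exact le_of_eq h
          · have hpd : (sorted_arr.drop i).Pairwise (fun a b => b < a) :=
              hpair.sublist (List.drop_sublist i sorted_arr)
            rw [hdrops, List.pairwise_cons] at hpd
            exact le_of_lt (hpd.1 y h)
        have hnmem : sorted_arr[i] ∈ arr.drop i := by
          apply hdropperm.mem_iff.mp
          rw [hdrops]; exact List.mem_cons_self
        have hmem : sorted_arr[i] ∈ arr := List.mem_of_mem_drop hnmem
        -- B's max over the suffix is sorted_arr[i]
        have hmax : (PySem.List.max? (arr.drop i) (fun x => x)).getD 0 = sorted_arr[i] := by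
          cases h : PySem.List.max? (arr.drop i) (fun x => x) with
          | none =>
            rw [PySem.List.max?_eq_none_iff] at h
            rw [hdropa] at h; cases h
          | some m =>
            have hm1 : m ∈ arr.drop i := PySem.List.max?_mem h
            have hm2 : sorted_arr[i] ≤ m := PySem.List.max?_isMax h _ hnmem
            exact le_antisymm (hub m hm1) hm2 ▸ rfl
        -- B's index term is idxOf in the suffix
        have hidxterm : (PySem.List.index? (arr.drop i) sorted_arr[i]).getD 0
            = (arr.drop i).idxOf sorted_arr[i] := by
          rw [PySem.List.index?_eq_idxOf?, idxOf?_of_mem hnmem]; rfl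
        -- sorted_arr[i] does not occur before position i in arr
        have hnottake : sorted_arr[i] ∉ arr.take i := by
          rw [htake]
          have hns : sorted_arr.Nodup := hperm.symm.nodup hnd
          intro hc
          have h := hns
          rw [← List.take_append_drop i sorted_arr, List.nodup_append] at h
          exact h.2.2 _ hc _ (by rw [hdrops]; exact List.mem_cons_self) rfl
        have hidxarr : arr.idxOf sorted_arr[i] = i + (arr.drop i).idxOf sorted_arr[i] := by
          conv_lhs => rw [← List.take_append_drop i arr]
          rw [List.idxOf_append_of_notMem hnottake, List.length_take_of_le (le_of_lt hi)]
        rw [lpLoopA, lpLoopB, dif_pos (⟨hk, hi⟩ : 0 < k ∧ i < arr.length), dif_pos hi,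
          if_neg (by omega : ¬ k ≤ 0)]
        simp only [hgs, hga, hmax, hidxterm]
        by_cases heq : sorted_arr[i] = arr[i]
        · -- skip step on both sides
          have hz : (arr.drop i).idxOf sorted_arr[i] = 0 := by
            rw [hdropa, List.idxOf_cons, heq]; simp
          rw [if_pos heq, hz]
          simp only [Nat.add_zero, ne_eq, not_true_eq_false, if_false]
          apply ih
          · omega
          · refine ⟨hnd, hperm, hpair, ?_, hind⟩
            intro j hj
            by_cases hji : j < i
            · exact hpre j hji
            · have : j = i := by omega
              subst this
              rw [hgs, hga, heq]
        · -- swap step on both sides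
          have hz : (arr.drop i).idxOf sorted_arr[i] ≠ 0 := by
            rw [hdropa, List.idxOf_cons]
            have hb : (arr[i] == sorted_arr[i]) = false := by
              simp [show ¬ arr[i] = sorted_arr[i] from fun h => heq h.symm]
            rw [hb]
            simp
          have hPlt : arr.idxOf sorted_arr[i] < arr.length := List.idxOf_lt_length_of_mem hmem
          have hPi : i < arr.idxOf sorted_arr[i] := by omega
          have hgetP : arr[arr.idxOf sorted_arr[i]]'hPlt = sorted_arr[i] :=
            List.getElem_idxOf hPlt
          -- A's dict lookup gives exactly idxOf
          have hdict : (indices.getD sorted_arr[i] 0).toNat = arr.idxOf sorted_arr[i] := by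
            rw [PySem.Dict.getD_of_get?_eq_some _ _ (hind _ hmem)]
            simp
          have hgd1 : arr.getD (i + (arr.drop i).idxOf sorted_arr[i]) 0 = sorted_arr[i] := by
            rw [← hidxarr, List.getD_eq_getElem _ 0 hPlt]; exact hgetP
          rw [if_neg heq, if_pos (by omega : ¬ i + (arr.drop i).idxOf sorted_arr[i] = i),
            hdict, hgd1, ← hidxarr]
          -- the two recursive calls now have identical arguments; apply the IH
          have hE : ∀ p (hp : p < arr.length),
              ((arr.set i sorted_arr[i]).set (arr.idxOf sorted_arr[i]) arr[i])[p]'(by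
                simpa using hp)
              = if p = arr.idxOf sorted_arr[i] then arr[i]
                else if p = i then sorted_arr[i] else arr[p]'hp :=
            fun p hp => getElem_set_set arr i (arr.idxOf sorted_arr[i]) p _ _ hp
          have haperm :
              ((arr.set i sorted_arr[i]).set (arr.idxOf sorted_arr[i]) arr[i]).Perm arr := by
            have h := List.set_set_perm (as := arr) (i := i) (j := arr.idxOf sorted_arr[i])
              hi hPlt
            rwa [hgetP] at h
          have hnd' := haperm.symm.nodup hnd
          apply ih
          · simp only [List.length_set]; omega
          · refine ⟨hnd', hperm.trans haperm.symm, hpair, ?_, ?_⟩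
            · intro j hj
              have hjl : j < arr.length := by omega
              rw [List.getD_eq_getElem _ 0 (by simpa using hjl),
                List.getD_eq_getElem _ 0 (by omega : j < sorted_arr.length), hE j hjl]
              by_cases hji : j < i
              · rw [if_neg (by omega), if_neg (by omega)]
                have e := hpre j hji
                rwa [List.getD_eq_getElem _ 0 hjl,
                  List.getD_eq_getElem _ 0 (by omega : j < sorted_arr.length)] at e
              · have hj' : j = i := by omega
                subst hj'
                split_ifs with h1 h2
                · exact absurd h1 (by omega)
                · rfl
                · exact absurd rfl h2
            · intro v hv
              have hva : v ∈ arr := haperm.mem_iff.mp hv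
              by_cases hvo : v = arr[i]
              · subst hvo
                rw [PySem.Dict.get?_insert_self]
                have h1 : ((arr.set i sorted_arr[i]).set (arr.idxOf sorted_arr[i])
                    arr[i])[arr.idxOf sorted_arr[i]]'(by simpa using hPlt) = arr[i] := by
                  rw [hE _ hPlt, if_pos rfl]
                have h2 := hnd'.idxOf_getElem (arr.idxOf sorted_arr[i]) (by simpa using hPlt)
                rw [h1] at h2
                rw [h2]
              · rw [PySem.Dict.get?_insert_of_ne _ _ hvo]
                by_cases hvn : v = sorted_arr[i]
                · subst hvn
                  rw [PySem.Dict.get?_insert_self]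
                  have h1 : ((arr.set i sorted_arr[i]).set (arr.idxOf sorted_arr[i])
                      arr[i])[i]'(by simpa using hi) = sorted_arr[i] := by
                    rw [hE _ hi, if_neg (by omega), if_pos rfl]
                  have h2 := hnd'.idxOf_getElem i (by simpa using hi)
                  rw [h1] at h2
                  rw [h2]
                · rw [PySem.Dict.get?_insert_of_ne _ _ hvn, hind v hva]
                  have hq : arr.idxOf v < arr.length := List.idxOf_lt_length_of_mem hva
                  have hqv : arr[arr.idxOf v]'hq = v := List.getElem_idxOf hq
                  have hqi : arr.idxOf v ≠ i := by
                    intro h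
                    exact hvo (by rw [← hqv]; simp only [h])
                  have hqP : arr.idxOf v ≠ arr.idxOf sorted_arr[i] := by
                    intro h
                    exact hvn (by rw [← hqv]; simp only [h]; exact hgetP)
                  have h1 : ((arr.set i sorted_arr[i]).set (arr.idxOf sorted_arr[i])
                      arr[i])[arr.idxOf v]'(by simpa using hq) = v := by
                    rw [hE _ hq, if_neg hqP, if_neg hqi]
                    exact hqv
                  have h2 := hnd'.idxOf_getElem (arr.idxOf v) (by simpa using hq)
                  rw [h1] at h2
                  rw [h2]
      · -- k exhausted: both return arr
        rw [lpLoopA, lpLoopB, dif_neg (by omega : ¬ (0 < k ∧ i < arr.length)),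
          dif_pos hi, if_pos (by omega : k ≤ 0)]
    · rw [lpLoopA, lpLoopB, dif_neg (by omega : ¬ (0 < k ∧ i < arr.length)),
        dif_neg hi]

-- ===== VERDICT (by name: the statement is the Claim_ definition above) =====
theorem largestPermutation_spec : Claim_equal_largestPermutation := by
  intro k arr _ hpre
  unfold Spec_largestPermutation largestPermutation largestPermutation_alt
  rcases hpre with hk0 | hpre
  · -- k ≤ 0: neither loop swaps anything; both return arr unchanged
    have hb : lpLoopB k arr 0 = arr := by
      rw [lpLoopB]
      by_cases h : 0 < arr.length
      · rw [dif_pos h, if_pos hk0]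
      · rw [dif_neg h]
    rw [lpLoopA, dif_neg (by omega : ¬ (0 < k ∧ 0 < arr.length)), hb]
  apply lp_main arr.length
  · omega
  · refine ⟨hpre, PySem.List.sorted_perm arr (fun x => x) true, ?_, ?_, ?_⟩
    · have h1 := PySem.List.sorted_pairwise_rev (xs := arr) (key := fun x => x)
      have h2 : (PySem.List.sorted arr (fun x => x) true).Nodup :=
        ((PySem.List.sorted_perm arr (fun x => x) true).symm).nodup hpre
      exact (List.Pairwise.and h1 h2).imp (fun h => lt_of_le_of_ne h.1 (Ne.symm h.2))
    · intro j hj; omega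
    · exact lpIndicesA_get arr hpre
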